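-- pv_equiv track=rewrite | github.com/osalas29/spiner-pro-app | construir_patrones.py | _numeros_por_color_y_decenas
-- ===== SOURCE A (Python) =====
-- ROJOS = {1,3,5,7,9,12,14,16,18,19,21,23,25,27,30,32,34,36}
--
-- NEGROS = set(range(1,37)) - ROJOS
--
-- DECENA_RANGOS = {
--     "D1": range(1, 13),
--     "D2": range(13, 25),
--     "D3": range(25, 37),
-- }
--
-- def _numeros_por_color_y_decenas(color_nombre, d1, d2, d3, incluir_cero=True):
--     # color_nombre: 'Rojo'|'Negro'|'Verde'
--     if color_nombre == "Verde":
--         return [0] if incluir_cero else []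
--
--     color_set = ROJOS if color_nombre == "Rojo" else NEGROS
--     decenas_act = []
--     if d1: decenas_act.append("D1")
--     if d2: decenas_act.append("D2")
--     if d3: decenas_act.append("D3")
--
--     nums = set()
--     for d in decenas_act:
--         for n in DECENA_RANGOS[d]:
--             if n in color_set:
--                 nums.add(n)
--     if incluir_cero:
--         nums.add(0)
--     return sorted(nums)
-- ===== SOURCE B (Python) =====
-- ROJOS = {1,3,5,7,9,12,14,16,18,19,21,23,25,27,30,32,34,36}
--
-- NEGROS = set(range(1,37)) - ROJOS
--
-- def _numeros_por_color_y_decenas(color_nombre, d1, d2, d3, incluir_cero=True):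
--     if color_nombre == "Verde":
--         return [0] if incluir_cero else []
--     activos = {i for i, flag in enumerate((d1, d2, d3)) if flag}
--     miembros = ROJOS if color_nombre == "Rojo" else NEGROS
--     res = sorted(n for n in miembros if (n - 1) // 12 in activos)
--     return [0] + res if incluir_cero else res
-- ===== Notes on version B (the rewrite author's own statement) =====
-- stated objective: simpler
-- what changed: Instead of iterating the active decade ranges and testing each number for color membership, B iterates the color members once, computes each one's decade index in closed form as (n-1)//12 and keeps those whose index is in the active-index set; 0 is prepended (not set-added) when incluir_cero.
import Mathlib
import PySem

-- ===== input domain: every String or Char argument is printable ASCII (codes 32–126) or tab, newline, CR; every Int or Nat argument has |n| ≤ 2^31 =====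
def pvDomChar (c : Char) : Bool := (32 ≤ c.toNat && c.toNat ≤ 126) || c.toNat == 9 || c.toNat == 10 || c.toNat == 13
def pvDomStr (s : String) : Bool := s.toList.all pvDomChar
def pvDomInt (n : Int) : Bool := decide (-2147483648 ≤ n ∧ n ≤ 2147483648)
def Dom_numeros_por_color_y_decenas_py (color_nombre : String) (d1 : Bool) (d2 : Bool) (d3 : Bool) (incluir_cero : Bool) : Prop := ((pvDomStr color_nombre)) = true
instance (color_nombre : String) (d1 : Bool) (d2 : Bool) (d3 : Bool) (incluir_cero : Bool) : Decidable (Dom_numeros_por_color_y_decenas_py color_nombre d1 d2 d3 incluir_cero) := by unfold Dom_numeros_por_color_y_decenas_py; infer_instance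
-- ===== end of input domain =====

-- B replaces A's decade→range→membership nesting by one pass over the color members with the closed-form decade index (n-1)//12; objective: simpler decomposition, same cost.


-- ===== PORT A =====
def pvROJOS : PySem.Set Int :=
  PySem.Set.ofList [1,3,5,7,9,12,14,16,18,19,21,23,25,27,30,32,34,36]

def pvNEGROS : PySem.Set Int :=
  PySem.Set.diff (PySem.Set.ofList (PySem.List.pyRange 1 37 1)) pvROJOS

def pvDECENA_RANGOS : PySem.Dict String (List Int) :=
  PySem.Dict.insert (PySem.Dict.insert (PySem.Dict.insert PySem.Dict.empty
    "D1" (PySem.List.pyRange 1 13 1))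
    "D2" (PySem.List.pyRange 13 25 1))
    "D3" (PySem.List.pyRange 25 37 1)

def numeros_por_color_y_decenas_py (color_nombre : String) (d1 : Bool) (d2 : Bool) (d3 : Bool) (incluir_cero : Bool) : List Int :=
  if color_nombre == "Verde" then
    (if incluir_cero then [(0 : Int)] else [])
  else
    let color_set := if color_nombre == "Rojo" then pvROJOS else pvNEGROS
    let decenas_act : List String :=
      (if d1 then ["D1"] else []) ++ (if d2 then ["D2"] else []) ++ (if d3 then ["D3"] else [])
    let nums : PySem.Set Int :=
      decenas_act.foldl (fun nums d =>
        (PySem.Dict.getD pvDECENA_RANGOS d []).foldl (fun nums n =>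
          if PySem.Set.contains color_set n then PySem.Set.add nums n else nums) nums)
        PySem.Set.empty
    let nums := if incluir_cero then PySem.Set.add nums 0 else nums
    PySem.List.sorted nums (fun x => x) false

-- ===== PORT B =====
-- B: one pass over the color members, decade index computed in closed form (n-1)//12;
--    objective: simpler decomposition, same cost.
def numeros_por_color_y_decenas_py_alt (color_nombre : String) (d1 : Bool) (d2 : Bool) (d3 : Bool) (incluir_cero : Bool) : List Int :=
  if color_nombre == "Verde" then
    (if incluir_cero then [(0 : Int)] else [])
  else
    let activos : PySem.Set Int :=
      PySem.Set.ofList (((PySem.List.enumerate [d1, d2, d3] 0).filter (fun p => p.2)).map (fun p => p.1))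
    let miembros := if color_nombre == "Rojo" then pvROJOS else pvNEGROS
    let res :=
      PySem.List.sorted (miembros.filter (fun n => PySem.Set.contains activos (PySem.Int.floordiv (n - 1) 12)))
        (fun x => x) false
    if incluir_cero then (0 : Int) :: res else res

-- ===== PRECONDITION & SPEC =====
def Spec_numeros_por_color_y_decenas_py (color_nombre : String) (d1 : Bool) (d2 : Bool) (d3 : Bool) (incluir_cero : Bool) (out : List Int) : Prop := out = numeros_por_color_y_decenas_py_alt color_nombre d1 d2 d3 incluir_cero
instance (color_nombre : String) (d1 : Bool) (d2 : Bool) (d3 : Bool) (incluir_cero : Bool) (out : List Int) : Decidable (Spec_numeros_por_color_y_decenas_py color_nombre d1 d2 d3 incluir_cero out) := by unfold Spec_numeros_por_color_y_decenas_py; infer_instance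

-- ===== CLAIM (what is proved, stated in full; the proofs are below) =====
def Claim_equal_numeros_por_color_y_decenas_py : Prop := ∀ (color_nombre : String) (d1 : Bool) (d2 : Bool) (d3 : Bool) (incluir_cero : Bool), Dom_numeros_por_color_y_decenas_py color_nombre d1 d2 d3 incluir_cero → Spec_numeros_por_color_y_decenas_py color_nombre d1 d2 d3 incluir_cero (numeros_por_color_y_decenas_py color_nombre d1 d2 d3 incluir_cero)

-- ===== LEMMAS AND PROOFS =====

-- ===== VERDICT (by name: the statement is the Claim_ definition above) =====
theorem numeros_por_color_y_decenas_py_spec : Claim_equal_numeros_por_color_y_decenas_py := by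
  intro c d1 d2 d3 z _
  unfold Spec_numeros_por_color_y_decenas_py numeros_por_color_y_decenas_py numeros_por_color_y_decenas_py_alt
  by_cases h1 : c == "Verde" <;> by_cases h2 : c == "Rojo" <;>
    simp only [h1, h2, if_true, if_false, Bool.false_eq_true] <;>
    cases d1 <;> cases d2 <;> cases d3 <;> cases z <;> decide
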